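-- pv_equiv track=rewrite | github.com/InterviewAce/coaching-resources | solutions/python/bfs/covid19_contact_tracing.py | find_closest_contact_distance
-- ===== SOURCE A (Python) =====
-- from collections import defaultdict, deque
--
-- NO_CONNECTION_TO_INFECTED_INDIVIDUAL = -1
--
-- def build_graph(edges):
--     graph = defaultdict(list)
--
--     for node_one, node_two in edges:
--         graph[node_one].append(node_two)
--         graph[node_two].append(node_one)
--
--     return graph
--
-- def find_closest_contact_distance(initial_person_id, friendships, infected_people):
--     graph = build_graph(friendships)
--     infected_people_set = set(infected_people)
--
--     queue = deque()
--     start_person = (initial_person_id, 0)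
--     queue.append(start_person)
--
--     visited = set()
--     visited.add(initial_person_id)
--
--     while queue:
--         person_id, distance_from_initial_person = queue.popleft()
--
--         if person_id in infected_people:
--             return distance_from_initial_person
--
--         if person_id not in graph:
--             continue
--
--         neighbor_ids = graph[person_id]
--         for neighbor_id in neighbor_ids:
--             if neighbor_id in visited:
--                 continue
--             visited.add(neighbor_id)
--
--             neighbor = (neighbor_id, distance_from_initial_person + 1)
--             queue.append(neighbor)
--
--
--
--     return NO_CONNECTION_TO_INFECTED_INDIVIDUAL
-- ===== SOURCE B (Python) =====
-- def find_closest_contact_distance(initial_person_id, friendships, infected_people):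
--     graph = {}
--     for a, b in friendships:
--         graph.setdefault(a, []).append(b)
--         graph.setdefault(b, []).append(a)
--
--     infected = set(infected_people)
--     visited = {initial_person_id}
--     frontier = [initial_person_id]
--     distance = 0
--
--     while frontier:
--         if any(person in infected for person in frontier):
--             return distance
--         next_frontier = []
--         for person in frontier:
--             for neighbor in graph.get(person, []):
--                 if neighbor not in visited:
--                     visited.add(neighbor)
--                     next_frontier.append(neighbor)
--         frontier = next_frontier
--         distance += 1
--     return -1
-- ===== Notes on version B (the rewrite author's own statement) =====
-- stated objective: alternative
-- what changed: Replaced the deque of (person, distance) pairs by a level-synchronous BFS: a plain frontier list per level with a single distance counter, checking the whole frontier against the infected set before expanding it; no distance is stored per node and no queue of pairs exists.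
import Mathlib
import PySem

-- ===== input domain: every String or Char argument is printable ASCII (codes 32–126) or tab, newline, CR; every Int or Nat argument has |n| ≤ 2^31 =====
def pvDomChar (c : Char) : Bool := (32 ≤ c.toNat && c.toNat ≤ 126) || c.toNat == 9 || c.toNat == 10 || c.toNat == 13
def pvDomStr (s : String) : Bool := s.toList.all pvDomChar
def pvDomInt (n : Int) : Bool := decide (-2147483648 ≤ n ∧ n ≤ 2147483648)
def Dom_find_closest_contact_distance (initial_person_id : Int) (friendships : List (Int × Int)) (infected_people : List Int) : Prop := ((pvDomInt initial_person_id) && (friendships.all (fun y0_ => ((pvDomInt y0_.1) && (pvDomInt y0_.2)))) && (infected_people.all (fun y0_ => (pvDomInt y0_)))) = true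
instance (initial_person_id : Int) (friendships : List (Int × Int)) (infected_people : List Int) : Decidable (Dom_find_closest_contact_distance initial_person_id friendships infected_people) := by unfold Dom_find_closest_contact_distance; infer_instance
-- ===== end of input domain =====

-- B replaces A's deque of (person, distance) pairs by a level-synchronous BFS (frontier list
-- per level + one distance counter); objective: alternative decomposition, same asymptotic cost.

-- ===== PORT A =====
-- build_graph: defaultdict(list) with two appends per edge
def build_graph (edges : List (Int × Int)) : PySem.Dict Int (List Int) :=
  edges.foldl
    (fun graph e =>
      (graph.modify e.1 [] (fun l => l ++ [e.2])).modify e.2 [] (fun l => l ++ [e.1]))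
    PySem.Dict.empty

-- A's while-loop over the deque, one unit of fuel per pop.  Fuel 2*|friendships|+2 always
-- suffices: every pop after the first is preceded by a push, and every push marks a distinct
-- previously-unvisited friendship endpoint as visited (there are at most 2*|friendships| of them).
def bfsA (graph : PySem.Dict Int (List Int)) (infected_people : List Int) :
    Nat → List (Int × Int) → PySem.Set Int → Option Int
  | 0, _, _ => none
  | _ + 1, [], _ => some (-1)
  | fuel + 1, (person_id, distance_from_initial_person) :: queue, visited =>
    if infected_people.contains person_id then some distance_from_initial_person
    else if !(graph.contains person_id) then bfsA graph infected_people fuel queue visited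
    else
      let s := (graph.getD person_id []).foldl
        (fun (acc : List (Int × Int) × PySem.Set Int) neighbor_id =>
          if PySem.Set.contains acc.2 neighbor_id then acc
          else (acc.1 ++ [(neighbor_id, distance_from_initial_person + 1)],
                PySem.Set.add acc.2 neighbor_id)) (queue, visited)
      bfsA graph infected_people fuel s.1 s.2

def find_closest_contact_distance (initial_person_id : Int) (friendships : List (Int × Int)) (infected_people : List Int) : Int :=
  let graph := build_graph friendships
  let _infected_people_set := PySem.Set.ofList infected_people  -- A builds this set but never uses it
  match bfsA graph infected_people (2 * friendships.length + 2)
      [(initial_person_id, 0)] (PySem.Set.add PySem.Set.empty initial_person_id) with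
  | some r => r
  | none => -1

-- ===== PORT B =====
-- inner double loop of Source B: extend (next_frontier, visited) by the unvisited neighbours of one person
def expand_person (graph : PySem.Dict Int (List Int)) (acc : List Int × PySem.Set Int) (person : Int) :
    List Int × PySem.Set Int :=
  (graph.getD person []).foldl
    (fun acc neighbor =>
      if PySem.Set.contains acc.2 neighbor then acc
      else (acc.1 ++ [neighbor], PySem.Set.add acc.2 neighbor)) acc

-- Source B's while-loop, one unit of fuel per level; the same fuel bound suffices (each level that
-- recurses adds at least one previously-unvisited friendship endpoint to visited).
def level_loop (graph : PySem.Dict Int (List Int)) (infected : PySem.Set Int) :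
    Nat → List Int → PySem.Set Int → Int → Option Int
  | 0, _, _, _ => none
  | fuel + 1, frontier, visited, distance =>
    if frontier.isEmpty then some (-1)
    else if frontier.any (fun person => PySem.Set.contains infected person) then some distance
    else
      let s := frontier.foldl (expand_person graph) ([], visited)
      level_loop graph infected fuel s.1 s.2 (distance + 1)

def find_closest_contact_distance_alt (initial_person_id : Int) (friendships : List (Int × Int)) (infected_people : List Int) : Int :=
  let graph := build_graph friendships  -- Source B builds the same adjacency dict via setdefault+append
  match level_loop graph (PySem.Set.ofList infected_people) (2 * friendships.length + 2)
      [initial_person_id] (PySem.Set.ofList [initial_person_id]) 0 with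
  | some r => r
  | none => -1

-- ===== PRECONDITION & SPEC =====
def Spec_find_closest_contact_distance (initial_person_id : Int) (friendships : List (Int × Int)) (infected_people : List Int) (out : Int) : Prop := out = find_closest_contact_distance_alt initial_person_id friendships infected_people
instance (initial_person_id : Int) (friendships : List (Int × Int)) (infected_people : List Int) (out : Int) : Decidable (Spec_find_closest_contact_distance initial_person_id friendships infected_people out) := by unfold Spec_find_closest_contact_distance; infer_instance

-- ===== CLAIM (what is proved, stated in full; the proofs are below) =====
def Claim_equal_find_closest_contact_distance : Prop := ∀ (initial_person_id : Int) (friendships : List (Int × Int)) (infected_people : List Int), Dom_find_closest_contact_distance initial_person_id friendships infected_people → Spec_find_closest_contact_distance initial_person_id friendships infected_people (find_closest_contact_distance initial_person_id friendships infected_people)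

-- ===== LEMMAS AND PROOFS =====

-- number of candidate (friendship-endpoint) nodes not yet visited: the fuel measure
def pvMu (cand : List Int) (visited : PySem.Set Int) : Nat :=
  (cand.filter (fun x => !(PySem.Set.contains visited x))).length

theorem pv_contains_ofList (l : List Int) (p : Int) :
    l.contains p = PySem.Set.contains (PySem.Set.ofList l) p := by
  simp [PySem.Set.mem_ofList]


theorem pv_mu_add {cand : List Int} (hnd : cand.Nodup) {v : PySem.Set Int} {n : Int}
    (hn : n ∈ cand) (hv : PySem.Set.contains v n = false) :
    (cand.filter (fun x => !(PySem.Set.contains (PySem.Set.add v n) x))).length + 1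
      = (cand.filter (fun x => !(PySem.Set.contains v x))).length := by
  have hnv : n ∉ v := by simpa using hv
  induction cand with
  | nil => cases hn
  | cons c cs ih =>
    rcases List.nodup_cons.mp hnd with ⟨hc, hcs⟩
    rw [List.filter_cons, List.filter_cons]
    rcases List.mem_cons.mp hn with h | h
    · subst h
      have h1 : (!(PySem.Set.contains (PySem.Set.add v n) n)) = false := by
        simp
      have h2 : (!(PySem.Set.contains v n)) = true := by simp [hnv]
      have h3 : cs.filter (fun x => !(PySem.Set.contains (PySem.Set.add v n) x))
              = cs.filter (fun x => !(PySem.Set.contains v x)) := by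
        apply List.filter_congr
        intro x hx
        have hxn : x ≠ n := fun e => hc (e ▸ hx)
        simp [hxn]
      rw [h1, h2, h3]
      simp
    · have hcn : c ≠ n := fun e => hc (e ▸ h)
      have hhead : (!(PySem.Set.contains (PySem.Set.add v n) c)) = (!(PySem.Set.contains v c)) := by
        simp [hcn]
      rw [hhead]
      split
      · simpa using ih hcs h
      · exact ih hcs h


theorem pv_adj_step (friendships : List (Int × Int)) :
    ∀ (d : PySem.Dict Int (List Int)) (p n : Int),
    n ∈ (friendships.foldl
      (fun graph e =>
        (graph.modify e.1 [] (fun l => l ++ [e.2])).modify e.2 [] (fun l => l ++ [e.1])) d).getD p []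
    → n ∈ d.getD p [] ∨ n ∈ friendships.flatMap (fun e => [e.1, e.2]) := by
  induction friendships with
  | nil => intro d p n h; exact Or.inl h
  | cons e es ih =>
    intro d p n h
    rw [List.foldl_cons] at h
    rcases ih _ p n h with h' | h'
    · rw [PySem.Dict.getD_modify, PySem.Dict.getD_modify] at h'
      have hgoal : n ∈ List.flatMap (fun e => [e.1, e.2]) (e :: es) ↔
          (n = e.1 ∨ n = e.2 ∨ n ∈ List.flatMap (fun e => [e.1, e.2]) es) := by
        simp
      split_ifs at h' with h1 h2
      · subst h1
        rw [h2]
        simp only [List.mem_append, List.mem_singleton] at h'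
        rw [hgoal]
        rw [h2] at h'
        tauto
      · subst h1
        simp only [List.mem_append, List.mem_singleton] at h'
        rw [hgoal]
        tauto
      · rw [PySem.Dict.getD_modify] at h'
        split_ifs at h' with h3
        · subst h3
          simp only [List.mem_append, List.mem_singleton] at h'
          rw [hgoal]
          tauto
        · exact Or.inl h'
    · right
      rw [List.flatMap_cons]
      exact List.mem_append_right _ h'

theorem pv_fold_eq (d : Int) (ns : List Int) :
    ∀ (Q : List (Int × Int)) (M : List Int) (v : PySem.Set Int),
    ns.foldl
      (fun (acc : List (Int × Int) × PySem.Set Int) n =>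
        if PySem.Set.contains acc.2 n then acc
        else (acc.1 ++ [(n, d + 1)], PySem.Set.add acc.2 n))
      (Q ++ M.map (fun x => (x, d + 1)), v)
    = (Q ++ (ns.foldl
          (fun (acc : List Int × PySem.Set Int) n =>
            if PySem.Set.contains acc.2 n then acc
            else (acc.1 ++ [n], PySem.Set.add acc.2 n)) (M, v)).1.map (fun x => (x, d + 1)),
       (ns.foldl
          (fun (acc : List Int × PySem.Set Int) n =>
            if PySem.Set.contains acc.2 n then acc
            else (acc.1 ++ [n], PySem.Set.add acc.2 n)) (M, v)).2) := by
  induction ns with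
  | nil => intro Q M v; rfl
  | cons n ns ih =>
    intro Q M v
    rw [List.foldl_cons, List.foldl_cons]
    cases hv : PySem.Set.contains v n
    · simp only [if_false, Bool.false_eq_true]
      have : Q ++ M.map (fun x => (x, d + 1)) ++ [(n, d + 1)]
           = Q ++ (M ++ [n]).map (fun x => (x, d + 1)) := by
        simp [List.map_append]
      rw [this]
      exact ih Q (M ++ [n]) (PySem.Set.add v n)
    · simp only [if_true]
      exact ih Q M v

theorem pv_level_eq (g : PySem.Dict Int (List Int)) (inf : List Int) (d : Int) :
    ∀ (F : List Int) (f : Nat) (M : List Int) (v : PySem.Set Int),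
    bfsA g inf (F.length + f) (F.map (fun x => (x, d)) ++ M.map (fun x => (x, d + 1))) v
    = if F.any (fun p => inf.contains p) then some d
      else bfsA g inf f
        ((F.foldl (expand_person g) (M, v)).1.map (fun x => (x, d + 1)))
        (F.foldl (expand_person g) (M, v)).2 := by
  intro F
  induction F with
  | nil => intro f M v; simp
  | cons p F ih =>
    intro f M v
    have hlen : (p :: F).length + f = (F.length + f) + 1 := by simp; omega
    rw [hlen, List.map_cons, List.cons_append, bfsA]
    cases hinf : inf.contains p
    · simp only [Bool.false_eq_true, if_false]
      cases hg : g.contains p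
      · have hg0 : g.getD p [] = [] := PySem.Dict.getD_of_not_contains g [] hg
        simp only [Bool.not_false, if_true]
        rw [ih f M v]
        simp only [List.any_cons, hinf, Bool.false_or, List.foldl_cons, expand_person, hg0,
          List.foldl_nil]
      · simp only [Bool.not_true, Bool.false_eq_true, if_false]
        rw [pv_fold_eq d (g.getD p []) (F.map (fun x => (x, d))) M v]
        rw [ih f]
        simp only [List.any_cons, hinf, Bool.false_or, List.foldl_cons, expand_person]
    · simp only [if_true]
      simp only [List.any_cons, hinf, Bool.true_or, if_true]

theorem pv_expand_inner {cand : List Int} (hnd : cand.Nodup) :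
    ∀ (ns : List Int), (∀ n ∈ ns, n ∈ cand) → ∀ (M : List Int) (v : PySem.Set Int),
    (ns.foldl
      (fun (acc : List Int × PySem.Set Int) n =>
        if PySem.Set.contains acc.2 n then acc
        else (acc.1 ++ [n], PySem.Set.add acc.2 n)) (M, v)).1.length
      + pvMu cand (ns.foldl
      (fun (acc : List Int × PySem.Set Int) n =>
        if PySem.Set.contains acc.2 n then acc
        else (acc.1 ++ [n], PySem.Set.add acc.2 n)) (M, v)).2
    = M.length + pvMu cand v := by
  intro ns
  induction ns with
  | nil => intro _ M v; rfl
  | cons n ns ih =>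
    intro hsub M v
    rw [List.foldl_cons]
    cases hv : PySem.Set.contains v n
    · simp only [Bool.false_eq_true, if_false]
      rw [ih (fun m hm => hsub m (List.mem_cons_of_mem n hm)) (M ++ [n]) (PySem.Set.add v n)]
      rw [List.length_append]
      have hmu := pv_mu_add (n := n) (v := v) hnd (hsub n List.mem_cons_self) hv
      unfold pvMu
      unfold pvMu at hmu
      simp only [List.length_singleton]
      omega
    · simp only [if_true]
      exact ih (fun m hm => hsub m (List.mem_cons_of_mem n hm)) M v

theorem pv_expand_measure {cand : List Int} (hnd : cand.Nodup)
    (g : PySem.Dict Int (List Int)) (hadj : ∀ p n, n ∈ g.getD p [] → n ∈ cand) :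
    ∀ (F M : List Int) (v : PySem.Set Int),
    (F.foldl (expand_person g) (M, v)).1.length + pvMu cand (F.foldl (expand_person g) (M, v)).2
      = M.length + pvMu cand v := by
  intro F
  induction F with
  | nil => intro M v; rfl
  | cons p F ih =>
    intro M v
    rw [List.foldl_cons]
    have hp : expand_person g (M, v) p
        = ((g.getD p []).foldl
            (fun (acc : List Int × PySem.Set Int) n =>
              if PySem.Set.contains acc.2 n then acc
              else (acc.1 ++ [n], PySem.Set.add acc.2 n)) (M, v)) := rfl
    rw [hp]
    rw [ih]
    rw [show ((g.getD p []).foldl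
            (fun (acc : List Int × PySem.Set Int) n =>
              if PySem.Set.contains acc.2 n then acc
              else (acc.1 ++ [n], PySem.Set.add acc.2 n)) (M, v))
       = (((g.getD p []).foldl
            (fun (acc : List Int × PySem.Set Int) n =>
              if PySem.Set.contains acc.2 n then acc
              else (acc.1 ++ [n], PySem.Set.add acc.2 n)) (M, v)).1,
          ((g.getD p []).foldl
            (fun (acc : List Int × PySem.Set Int) n =>
              if PySem.Set.contains acc.2 n then acc
              else (acc.1 ++ [n], PySem.Set.add acc.2 n)) (M, v)).2) from rfl]
    exact pv_expand_inner hnd (g.getD p []) (fun n hn => hadj p n hn) M v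

theorem pv_main (g : PySem.Dict Int (List Int)) (inf : List Int) {cand : List Int}
    (hnd : cand.Nodup) (hadj : ∀ p n, n ∈ g.getD p [] → n ∈ cand) (fB : Nat) :
    ∀ (F : List Int) (v : PySem.Set Int) (d : Int) (fA : Nat),
    F.length + pvMu cand v + 1 ≤ fA → pvMu cand v + 2 ≤ fB →
    bfsA g inf fA (F.map (fun x => (x, d))) v
      = level_loop g (PySem.Set.ofList inf) fB F v d := by
  induction fB with
  | zero => intro F v d fA hA hB; omega
  | succ fB ih =>
    intro F v d fA hA hB
    cases F with
    | nil =>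
      obtain ⟨fA', rfl⟩ : ∃ k, fA = k + 1 := ⟨fA - 1, by omega⟩
      simp [bfsA, level_loop]
    | cons p F =>
      obtain ⟨f, rfl, hf⟩ : ∃ f, fA = (p :: F).length + f ∧ pvMu cand v + 1 ≤ f :=
        ⟨fA - (p :: F).length, by omega, by omega⟩
      have hq : (p :: F).map (fun x => (x, d))
          = (p :: F).map (fun x => (x, d)) ++ ([] : List Int).map (fun x => (x, d + 1)) := by
        simp
      rw [hq, pv_level_eq, level_loop]
      simp only [List.isEmpty_cons, Bool.false_eq_true, if_false]
      have hany : ((p :: F).any fun q => inf.contains q)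
          = ((p :: F).any fun q => PySem.Set.contains (PySem.Set.ofList inf) q) := by
        simp only [pv_contains_ofList]
      rw [← hany]
      cases hc : (p :: F).any fun q => inf.contains q
      · simp only [Bool.false_eq_true, if_false]
        have hmeas := pv_expand_measure hnd g hadj (p :: F) [] v
        cases hs1 : ((p :: F).foldl (expand_person g) ([], v)).1 with
        | nil =>
          obtain ⟨f', rfl⟩ : ∃ k, f = k + 1 := ⟨f - 1, by omega⟩
          obtain ⟨fB', rfl⟩ : ∃ k, fB = k + 1 := ⟨fB - 1, by omega⟩
          simp [bfsA, level_loop]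
        | cons a s1' =>
          rw [hs1] at hmeas
          simp only [List.length_cons, List.length_nil, Nat.zero_add] at hmeas
          rw [ih (a :: s1') ((p :: F).foldl (expand_person g) ([], v)).2 (d + 1) f
              (by simp only [List.length_cons]; omega) (by omega)]
      · simp only [if_true]

theorem pv_flat_len (friendships : List (Int × Int)) :
    (friendships.flatMap (fun e => [e.1, e.2])).length = 2 * friendships.length := by
  induction friendships with
  | nil => simp
  | cons e es ih => simp [ih]; ring

theorem pv_top (init : Int) (fr : List (Int × Int)) (inf : List Int) :
    find_closest_contact_distance init fr inf = find_closest_contact_distance_alt init fr inf := by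
  have hadj : ∀ p n, n ∈ (build_graph fr).getD p []
      → n ∈ (PySem.Set.ofList (fr.flatMap (fun e => [e.1, e.2])) : List Int) := by
    intro p n h
    rcases pv_adj_step fr PySem.Dict.empty p n h with h' | h'
    · rw [PySem.Dict.getD_empty] at h'
      cases h'
    · exact (PySem.Set.mem_ofList _ _).mpr h'
  have h1 : pvMu (PySem.Set.ofList (fr.flatMap (fun e => [e.1, e.2])))
      (PySem.Set.add PySem.Set.empty init) ≤ (PySem.Set.ofList (fr.flatMap (fun e => [e.1, e.2])) : List Int).length :=
    List.length_filter_le _ _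
  have h2 : (PySem.Set.ofList (fr.flatMap (fun e => [e.1, e.2])) : List Int).length
      ≤ (fr.flatMap (fun e => [e.1, e.2])).length := PySem.Set.length_ofList_le _
  have h3 := pv_flat_len fr
  have hmain := pv_main (build_graph fr) inf
      (PySem.Set.nodup_ofList (fr.flatMap (fun e => [e.1, e.2]))) hadj
      (2 * fr.length + 2) [init] (PySem.Set.add PySem.Set.empty init) 0 (2 * fr.length + 2)
      (by simp only [List.length_cons, List.length_nil]; omega) (by omega)
  simp only [List.map_cons, List.map_nil] at hmain
  show (match bfsA (build_graph fr) inf (2 * fr.length + 2) [(init, 0)] (PySem.Set.add PySem.Set.empty init) with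
    | some r => r
    | none => -1)
    = (match level_loop (build_graph fr) (PySem.Set.ofList inf) (2 * fr.length + 2) [init] (PySem.Set.ofList [init]) 0 with
    | some r => r
    | none => -1)
  rw [show (PySem.Set.ofList [init] : PySem.Set Int) = PySem.Set.add PySem.Set.empty init from rfl]
  rw [hmain]

-- ===== VERDICT (by name: the statement is the Claim_ definition above) =====
theorem find_closest_contact_distance_spec : Claim_equal_find_closest_contact_distance := by
  intro initial_person_id friendships infected_people _
  unfold Spec_find_closest_contact_distance
  exact pv_top initial_person_id friendships infected_people
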